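-- pv_equiv track=rewrite | github.com/devMingu/codeTest | 프로그래머스/명예의 전당.py | solution
-- ===== SOURCE A (Python) =====
-- import heapq
--
-- def solution(k, score):
--     answer = []
--
--     h = []
--
--     for el in score:
--         if len(h) <= k:
--             heapq.heappush(h, el)
--
--         else:
--             if h[0] < el:
--                 heapq.heappush(h, el)
--
--         if len(h) > k:
--             heapq.heappop(h)
--
--         answer.append(h[0])
--
--     return answer
-- ===== SOURCE B (Python) =====
-- import bisect
--
-- def solution(k, score):
--     answer = []
--     lst = []
--     for el in score:
--         bisect.insort(lst, el)
--         if len(lst) > k: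
--             lst.pop(0)
--         answer.append(lst[0])
--     return answer
-- ===== Notes on version B (the rewrite author's own statement) =====
-- stated objective: simpler
-- what changed: Replaces the binary heap and its conditional-push/compare-with-root logic by a plain list kept sorted with bisect.insort, unconditionally inserting each score and dropping the smallest when the list exceeds k.
import Mathlib
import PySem

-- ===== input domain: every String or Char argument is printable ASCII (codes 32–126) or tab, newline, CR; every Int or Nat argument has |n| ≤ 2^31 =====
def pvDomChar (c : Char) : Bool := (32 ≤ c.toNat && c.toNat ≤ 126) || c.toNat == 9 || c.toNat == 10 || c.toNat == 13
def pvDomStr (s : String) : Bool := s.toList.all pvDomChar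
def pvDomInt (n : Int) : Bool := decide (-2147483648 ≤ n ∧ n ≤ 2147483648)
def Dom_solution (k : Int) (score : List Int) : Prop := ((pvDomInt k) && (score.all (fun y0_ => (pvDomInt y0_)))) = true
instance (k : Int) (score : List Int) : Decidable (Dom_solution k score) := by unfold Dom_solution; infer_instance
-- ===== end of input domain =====

-- B replaces A's heap (and its conditional push) by a plain list kept sorted with
-- bisect.insort: simpler code, same values wherever A returns.

-- ===== PORT A =====
-- A uses the heapq standard library on a Python list; ported by hand as a skew
-- min-heap (exact for everything A observes: the multiset held, len(h) and the
-- minimum h[0]).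
inductive PyHeap : Type
  | nil : PyHeap
  | node : Int → PyHeap → PyHeap → PyHeap
deriving DecidableEq, Repr

def PyHeap.size : PyHeap → Nat
  | .nil => 0
  | .node _ l r => 1 + l.size + r.size

def PyHeap.merge : PyHeap → PyHeap → PyHeap
  | .nil, h => h
  | h, .nil => h
  | .node x l r, .node y l' r' =>
      if x ≤ y then .node x (PyHeap.merge r (.node y l' r')) l
      else .node y (PyHeap.merge r' (.node x l r)) l'
termination_by a b => a.size + b.size
decreasing_by all_goals (simp [PyHeap.size]; try omega)

-- heapq.heappush
def PyHeap.push (x : Int) (h : PyHeap) : PyHeap := PyHeap.merge (.node x .nil .nil) h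

-- heapq.heappop (A discards the returned value, so only the remaining heap is kept)
def PyHeap.pop : PyHeap → PyHeap
  | .nil => .nil
  | .node _ l r => PyHeap.merge l r

-- h[0]
def PyHeap.top? : PyHeap → Option Int
  | .nil => none
  | .node x _ _ => some x

def solution (k : Int) (score : List Int) : List Int :=
  (score.foldl (fun (st : PyHeap × List Int) el =>
      let h := st.1
      let h :=
        if (h.size : Int) ≤ k then PyHeap.push el h
        else match h.top? with
          | some t => if t < el then PyHeap.push el h else h
          | none => h          -- h[0] on an empty heap raises IndexError in Python; outside Pre_
      let h := if (h.size : Int) > k then h.pop else h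
      (h, st.2 ++ [h.top?.getD 0]))  -- h[0]; the empty-heap case raises in Python, outside Pre_
    (PyHeap.nil, [])).2

-- ===== PORT B =====
-- bisect.insort (insort_right: a new element goes after existing equal ones)
def insortR (x : Int) : List Int → List Int
  | [] => [x]
  | y :: ys => if y ≤ x then y :: insortR x ys else x :: y :: ys

def solution_alt (k : Int) (score : List Int) : List Int :=
  (score.foldl (fun (st : List Int × List Int) el =>
      let l := insortR el st.1
      let l := if (l.length : Int) > k then l.tail else l  -- lst.pop(0)
      (l, st.2 ++ [l.headD 0]))  -- lst[0]; the empty-list case raises in Python, outside Pre_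
    ([], [])).2

-- ===== PRECONDITION & SPEC =====
-- With a non-empty score and k ≤ 0 both programs raise IndexError (h[0] / lst[0] on an
-- emptied container), so exactly those inputs are excluded.
def Pre_solution (k : Int) (score : List Int) : Prop := score = [] ∨ 1 ≤ k
instance (k : Int) (score : List Int) : Decidable (Pre_solution k score) := by
  unfold Pre_solution; infer_instance

def pvWitness_solution : Int × List Int := (3, [10, 100, 20, 150, 1, 100, 200])

def Spec_solution (k : Int) (score : List Int) (out : List Int) : Prop := out = solution_alt k score
instance (k : Int) (score : List Int) (out : List Int) : Decidable (Spec_solution k score out) := by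
  unfold Spec_solution; infer_instance

-- ===== CLAIM (what is proved, stated in full; the proofs are below) =====
def Claim_equal_solution : Prop := ∀ (k : Int) (score : List Int),
  Dom_solution k score → Pre_solution k score → Spec_solution k score (solution k score)

-- ===== LEMMAS AND PROOFS =====

def PyHeap.toMS : PyHeap → Multiset Int
  | .nil => 0
  | .node x l r => x ::ₘ (l.toMS + r.toMS)

def PyHeap.IsHeap : PyHeap → Prop
  | .nil => True
  | .node x l r => (∀ y ∈ l.toMS + r.toMS, x ≤ y) ∧ l.IsHeap ∧ r.IsHeap

theorem toMS_merge (a b : PyHeap) : (PyHeap.merge a b).toMS = a.toMS + b.toMS := by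
  induction a, b using PyHeap.merge.induct with
  | case1 h => simp [PyHeap.merge, PyHeap.toMS]
  | case2 h _ => cases h <;> simp [PyHeap.merge, PyHeap.toMS]
  | case3 x l r y l' r' hle ih =>
      simp only [PyHeap.merge, if_pos hle, PyHeap.toMS, ih,
        ← Multiset.singleton_add]
      abel
  | case4 x l r y l' r' hle ih =>
      simp only [PyHeap.merge, if_neg hle, PyHeap.toMS, ih,
        ← Multiset.singleton_add]
      abel

theorem isHeap_merge (a b : PyHeap) (ha : a.IsHeap) (hb : b.IsHeap) :
    (PyHeap.merge a b).IsHeap := by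
  induction a, b using PyHeap.merge.induct with
  | case1 h => simpa [PyHeap.merge] using hb
  | case2 h hne => cases h <;> simpa [PyHeap.merge] using ha
  | case3 x l r y l' r' hle ih =>
      obtain ⟨hxall, hl, hr⟩ := ha
      simp only [PyHeap.merge, if_pos hle, PyHeap.IsHeap]
      refine ⟨?_, ih hr hb, hl⟩
      intro z hz
      simp only [toMS_merge, PyHeap.toMS, Multiset.mem_add, Multiset.mem_cons] at hz hxall
      rcases hz with (hz | ⟨rfl | hz⟩) | hz
      · exact hxall z (Or.inr hz)
      · exact hle
      · obtain ⟨hyall, _, _⟩ := hb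
        exact le_trans hle (hyall z (by simpa using hz))
      · exact hxall z (Or.inl hz)
  | case4 x l r y l' r' hle ih =>
      obtain ⟨hyall, hl', hr'⟩ := hb
      simp only [PyHeap.merge, if_neg hle, PyHeap.IsHeap]
      have hlt : y < x := by omega
      refine ⟨?_, ih hr' ha, hl'⟩
      intro z hz
      simp only [toMS_merge, PyHeap.toMS, Multiset.mem_add, Multiset.mem_cons] at hz hyall
      rcases hz with (hz | ⟨rfl | hz⟩) | hz
      · exact hyall z (Or.inr hz)
      · exact le_of_lt hlt
      · obtain ⟨hxall, _, _⟩ := ha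
        exact le_trans (le_of_lt hlt) (hxall z (by simpa using hz))
      · exact hyall z (Or.inl hz)

theorem top_le (x : Int) (l r : PyHeap) (h : (PyHeap.node x l r).IsHeap) :
    ∀ y ∈ (PyHeap.node x l r).toMS, x ≤ y := by
  intro y hy
  simp only [PyHeap.toMS, Multiset.mem_cons] at hy
  rcases hy with rfl | hy
  · exact le_refl y
  · exact h.1 y hy

theorem insortR_perm (x : Int) (l : List Int) : (insortR x l).Perm (x :: l) := by
  induction l with
  | nil => simp [insortR]
  | cons y ys ih =>
      by_cases h : y ≤ x
      · simp only [insortR, if_pos h]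
        exact (ih.cons y).trans (List.Perm.swap x y ys)
      · simp [insortR, h]

theorem toMS_insortR (x : Int) (l : List Int) :
    ((insortR x l : List Int) : Multiset Int) = x ::ₘ (l : Multiset Int) := by
  rw [Multiset.cons_coe, Multiset.coe_eq_coe]
  exact insortR_perm x l

theorem mem_insortR (z x : Int) (l : List Int) :
    z ∈ insortR x l ↔ z = x ∨ z ∈ l := by
  rw [(insortR_perm x l).mem_iff, List.mem_cons]

theorem pairwise_insortR (x : Int) (l : List Int) (h : l.Pairwise (· ≤ ·)) :
    (insortR x l).Pairwise (· ≤ ·) := by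
  induction l with
  | nil => simp [insortR]
  | cons y ys ih =>
      rcases List.pairwise_cons.mp h with ⟨hy, hys⟩
      by_cases hle : y ≤ x
      · simp only [insortR, if_pos hle]
        refine List.pairwise_cons.mpr ⟨?_, ih hys⟩
        intro z hz
        rcases (mem_insortR z x ys).mp hz with rfl | hz'
        · exact hle
        · exact hy z hz'
      · simp only [insortR, if_neg hle]
        refine List.pairwise_cons.mpr ⟨?_, h⟩
        intro z hz
        rcases List.mem_cons.mp hz with rfl | hz'
        · omega
        · have := hy z hz'; omega

-- the heap's root equals the head of the sorted list holding the same multiset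
theorem top_eq_head (h : PyHeap) (y : Int) (ys : List Int)
    (hh : h.IsHeap) (hms : h.toMS = ((y :: ys : List Int) : Multiset Int))
    (hs : (y :: ys).Pairwise (· ≤ ·)) : h.top? = some y := by
  cases h with
  | nil =>
      have := congrArg Multiset.card hms
      simp [PyHeap.toMS] at this
  | node x l r =>
      have hxmem : x ∈ ((y :: ys : List Int) : Multiset Int) := by
        rw [← hms]; simp [PyHeap.toMS]
      have hymem : y ∈ (PyHeap.node x l r).toMS := by rw [hms]; simp
      have hxy : x ≤ y := top_le x l r hh y hymem
      have hyx : y ≤ x := by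
        have : x ∈ y :: ys := by exact_mod_cast hxmem
        rcases List.mem_cons.mp this with rfl | hx'
        · exact le_refl x
        · exact (List.pairwise_cons.mp hs).1 x hx'
      simp [PyHeap.top?, le_antisymm hxy hyx]

theorem size_eq_card (h : PyHeap) : h.size = Multiset.card h.toMS := by
  induction h with
  | nil => simp [PyHeap.size, PyHeap.toMS]
  | node x l r ihl ihr => simp [PyHeap.size, PyHeap.toMS, ihl, ihr]; omega

-- A's loop and B's loop produce the same answer list from aligned states
theorem loop_eq (k : Int) (hk : 1 ≤ k) :
    ∀ (score : List Int) (h : PyHeap) (l ans : List Int),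
    h.IsHeap → h.toMS = (l : Multiset Int) → l.Pairwise (· ≤ ·) → (l.length : Int) ≤ k →
    (score.foldl (fun (st : PyHeap × List Int) el =>
      let h := st.1
      let h :=
        if (h.size : Int) ≤ k then PyHeap.push el h
        else match h.top? with
          | some t => if t < el then PyHeap.push el h else h
          | none => h
      let h := if (h.size : Int) > k then h.pop else h
      (h, st.2 ++ [h.top?.getD 0])) (h, ans)).2 =
    (score.foldl (fun (st : List Int × List Int) el =>
      let l := insortR el st.1
      let l := if (l.length : Int) > k then l.tail else l
      (l, st.2 ++ [l.headD 0])) (l, ans)).2 := by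
  intro score
  induction score with
  | nil => intro h l ans _ _ _ _; simp
  | cons el rest ih =>
      intro h l ans hh hms hsort hlen
      simp only [List.foldl_cons]
      have hsz : (h.size : Int) = (l.length : Int) := by
        have := size_eq_card h
        rw [hms] at this; simp [this]
      have hpush : ((h.size : Int) ≤ k) = True := by simp; omega
      set h1 := PyHeap.push el h with hh1
      set l1 := insortR el l with hl1
      have hh1heap : h1.IsHeap :=
        isHeap_merge _ _ (by simp [PyHeap.IsHeap, PyHeap.toMS]) hh
      have hms1 : h1.toMS = (l1 : Multiset Int) := by
        rw [hh1, PyHeap.push, toMS_merge, hl1, toMS_insortR, hms]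
        simp [PyHeap.toMS]
      have hsort1 : l1.Pairwise (· ≤ ·) := pairwise_insortR el l hsort
      have hlen1 : l1.length = l.length + 1 := by
        have := congrArg Multiset.card (toMS_insortR el l)
        simpa [hl1] using this
      have hsz1 : (h1.size : Int) = (l1.length : Int) := by
        have := size_eq_card h1
        rw [hms1] at this; simp [this]
      obtain ⟨y, ys, hyys⟩ : ∃ y ys, l1 = y :: ys := by
        cases hl : l1 with
        | nil => rw [hl] at hlen1; simp at hlen1
        | cons a as => exact ⟨a, as, rfl⟩
      have htop1 : h1.top? = some y :=
        top_eq_head h1 y ys hh1heap (by rw [hms1, hyys]) (hyys ▸ hsort1)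
      have hlys : l1.length = ys.length + 1 := by rw [hyys]; simp
      by_cases hover : (l1.length : Int) > k
      · -- both sides drop the minimum, then report the new minimum
        have hoverA : (h1.size : Int) > k := by omega
        obtain ⟨z, zs, hzzs⟩ : ∃ z zs, ys = z :: zs := by
          cases hys : ys with
          | nil => rw [hys] at hlys; simp at hlys; omega
          | cons a as => exact ⟨a, as, rfl⟩
        subst hzzs
        have hmspop : h1.pop.toMS = ((z :: zs : List Int) : Multiset Int) := by
          cases hcase : h1 with
          | nil => rw [hcase] at htop1; simp [PyHeap.top?] at htop1
          | node x hl hr =>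
              have hx : x = y := by
                rw [hcase] at htop1; simpa [PyHeap.top?] using htop1
              have hms2 : (PyHeap.node x hl hr).toMS
                  = ((y :: z :: zs : List Int) : Multiset Int) := by
                rw [← hcase, hms1, hyys]
              rw [PyHeap.toMS, hx, ← Multiset.cons_coe] at hms2
              have := (Multiset.cons_inj_right y).mp hms2
              simpa [PyHeap.pop, toMS_merge] using this
        have hpopheap : h1.pop.IsHeap := by
          cases hcase : h1 with
          | nil => simp [PyHeap.pop, PyHeap.IsHeap]
          | node x hl hr =>
              rw [hcase] at hh1heap
              exact isHeap_merge _ _ hh1heap.2.1 hh1heap.2.2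
        have hsortys : (z :: zs).Pairwise (· ≤ ·) := (List.pairwise_cons.mp (hyys ▸ hsort1)).2
        have hlenys : ((z :: zs).length : Int) ≤ k := by simp at hlys ⊢; omega
        have htoppop : h1.pop.top? = some z :=
          top_eq_head h1.pop z zs hpopheap (by rw [hmspop]) hsortys
        have hrec := ih h1.pop (z :: zs) (ans ++ [z]) hpopheap hmspop hsortys hlenys
        simp only [hpush, if_true, ← hh1, if_pos hoverA, if_pos hover, gt_iff_lt]
        simp only [← hl1, hyys, List.tail_cons]
        simpa [htoppop] using hrec
      · -- neither side drops anything
        have hnoA : ¬ ((h1.size : Int) > k) := by omega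
        have hrec := ih h1 l1 (ans ++ [y]) hh1heap hms1 hsort1 (by omega)
        simp only [hpush, if_true, ← hh1, if_neg hnoA, if_neg hover]
        rw [hyys] at hrec ⊢
        simpa [htop1] using hrec

-- ===== VERDICT (by name: the statement is the Claim_ definition above) =====
theorem solution_spec : Claim_equal_solution := by
  intro k score _ hpre
  unfold Spec_solution solution solution_alt
  rcases hpre with rfl | hk
  · simp
  · exact loop_eq k hk score PyHeap.nil [] [] trivial (by simp [PyHeap.toMS]) (by simp)
      (by simp; omega)
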